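-- pv_equiv track=rewrite | github.com/icebeartellsnolies/leetcode | car_fleet_853.py | fleets
-- ===== SOURCE A (Python) =====
-- def fleets(target, position, speed):
--     group0 = False
--     group_odd = False
--     group_even = False
--     for i in position:
--         if i==0:
--             group0 = True
--         elif i%2 == 0:
--             group_even = True
--         else:
--             group_odd = True
--         if group0 and group_odd and group_even:
--             return 3
--     trues = [group0, group_even, group_odd]
--     return trues.count(True)
-- ===== SOURCE B (Python) =====
-- def fleets(target, position, speed):
--     zero = any(p == 0 for p in position)
--     even = any(p != 0 and p % 2 == 0 for p in position)
--     odd = any(p % 2 != 0 for p in position)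
--     return zero + even + odd
-- ===== Notes on version B (the rewrite author's own statement) =====
-- stated objective: simpler
-- what changed: Replaces the single tagged early-exit flag loop with three independent any() scans (zero/even/odd present) summed as booleans.
import Mathlib
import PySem

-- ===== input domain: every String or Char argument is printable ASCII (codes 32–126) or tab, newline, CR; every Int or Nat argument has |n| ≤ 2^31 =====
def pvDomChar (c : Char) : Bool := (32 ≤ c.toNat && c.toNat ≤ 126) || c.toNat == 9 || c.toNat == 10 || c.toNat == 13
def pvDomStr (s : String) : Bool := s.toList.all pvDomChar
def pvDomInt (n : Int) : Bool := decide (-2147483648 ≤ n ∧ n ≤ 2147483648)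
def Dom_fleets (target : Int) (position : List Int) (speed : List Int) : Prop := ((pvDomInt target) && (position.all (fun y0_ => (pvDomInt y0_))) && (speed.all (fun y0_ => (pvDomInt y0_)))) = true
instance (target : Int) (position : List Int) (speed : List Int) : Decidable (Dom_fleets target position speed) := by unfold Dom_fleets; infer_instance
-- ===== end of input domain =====

-- B replaces A's single tagged early-exit flag loop by three independent any-scans summed as booleans (objective: simpler).

-- ===== PORT A =====
-- A's for-loop with the three mutable flags and the early `return 3`
def fleetsLoop : List Int → Bool → Bool → Bool → Int
  | [], g0, ge, go =>
      -- trues = [group0, group_even, group_odd]; trues.count(True)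
      ((if g0 then 1 else 0) + (if ge then 1 else 0) + (if go then 1 else 0) : Int)
  | i :: rest, g0, ge, go =>
      let g0' := if i == 0 then true else g0
      let ge' := if i == 0 then ge else (if PySem.Int.mod i 2 == 0 then true else ge)
      let go' := if i == 0 then go else (if PySem.Int.mod i 2 == 0 then go else true)
      if g0' && go' && ge' then 3 else fleetsLoop rest g0' ge' go'

def fleets (target : Int) (position : List Int) (speed : List Int) : Int :=
  fleetsLoop position false false false

-- ===== PORT B =====
def fleets_alt (target : Int) (position : List Int) (speed : List Int) : Int :=
  let zero := position.any (fun p => p == 0)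
  let even := position.any (fun p => p != 0 && PySem.Int.mod p 2 == 0)
  let odd := position.any (fun p => PySem.Int.mod p 2 != 0)
  ((if zero then 1 else 0) + (if even then 1 else 0) + (if odd then 1 else 0) : Int)

-- ===== PRECONDITION & SPEC =====
def Spec_fleets (target : Int) (position : List Int) (speed : List Int) (out : Int) : Prop := out = fleets_alt target position speed
instance (target : Int) (position : List Int) (speed : List Int) (out : Int) : Decidable (Spec_fleets target position speed out) := by unfold Spec_fleets; infer_instance

-- ===== CLAIM (what is proved, stated in full; the proofs are below) =====
def Claim_equal_fleets : Prop := ∀ (target : Int) (position : List Int) (speed : List Int), Dom_fleets target position speed → Spec_fleets target position speed (fleets target position speed)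

-- ===== LEMMAS AND PROOFS =====
theorem fleetsLoop_char (l : List Int) (g0 ge go : Bool) :
    fleetsLoop l g0 ge go =
      ((if g0 || l.any (fun p => p == 0) then 1 else 0)
       + (if ge || l.any (fun p => p != 0 && PySem.Int.mod p 2 == 0) then 1 else 0)
       + (if go || l.any (fun p => PySem.Int.mod p 2 != 0) then 1 else 0) : Int) := by
  induction l generalizing g0 ge go with
  | nil => simp [fleetsLoop]
  | cons i rest ih =>
    cases hz : (i == 0) with
    | true =>
      have hi : i = 0 := by simpa using hz
      have hm : (PySem.Int.mod i 2 == 0) = true := by subst hi; decide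
      have he : ((i != 0) && (PySem.Int.mod i 2 == 0)) = false := by
        simp only [bne, hz, Bool.not_false, Bool.not_true, Bool.false_and]
      have ho : (PySem.Int.mod i 2 != 0) = false := by
        simp only [bne, hm, Bool.not_true]
      simp only [fleetsLoop, List.any_cons, hz, hm, he, ho, Bool.false_or, Bool.true_or, ih]
      cases go <;> cases ge <;> cases g0 <;>
        cases ha : rest.any (fun p => (p != 0) && (PySem.Int.mod p 2 == 0)) <;>
        cases hb : rest.any (fun p => PySem.Int.mod p 2 != 0) <;>
        simp [ha, hb, hi]
    | false =>
      have hi : ¬ i = 0 := by simpa using hz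
      cases hm : (PySem.Int.mod i 2 == 0) with
      | true =>
        have he : ((i != 0) && (PySem.Int.mod i 2 == 0)) = true := by
          simp only [bne, hz, hm, Bool.not_false, Bool.and_true]
        have ho : (PySem.Int.mod i 2 != 0) = false := by
          simp only [bne, hm, Bool.not_true]
        simp only [fleetsLoop, List.any_cons, hz, hm, he, ho, Bool.false_or, Bool.true_or, ih]
        cases g0 <;> cases go <;> cases ge <;>
          cases ha : rest.any (fun p => p == 0) <;>
          cases hb : rest.any (fun p => PySem.Int.mod p 2 != 0) <;>
          simp [ha, hb, hi]
      | false =>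
        have he : ((i != 0) && (PySem.Int.mod i 2 == 0)) = false := by
          simp only [bne, hm, Bool.and_false]
        have ho : (PySem.Int.mod i 2 != 0) = true := by
          simp only [bne, hm, Bool.not_false]
        simp only [fleetsLoop, List.any_cons, hz, hm, he, ho, Bool.false_or, Bool.true_or, ih]
        cases g0 <;> cases ge <;> cases go <;>
          cases ha : rest.any (fun p => p == 0) <;>
          cases hb : rest.any (fun p => (p != 0) && (PySem.Int.mod p 2 == 0)) <;>
          simp [ha, hb, hi]

-- ===== VERDICT (by name: the statement is the Claim_ definition above) =====
theorem fleets_spec : Claim_equal_fleets := by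
  intro target position speed _
  unfold Spec_fleets fleets fleets_alt
  simp only [fleetsLoop_char, Bool.false_or]
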